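-- pv_equiv track=rewrite | github.com/ezhang-dev/Competitive-Programming | DMOJ/CCC/CCC '11 S3 - Alice Through the Looking Glass.py | rec
-- ===== SOURCE A (Python) =====
-- def base(x,y):
--     if (x in [1,2,3] and y==0) or (x==2 and y==1):
--         return 1
--     if (x in [1,3] and y==1) or (x==2 and y==2):
--         return 2
--     return 0
--
-- def rec(m,x,y):
--     off=5**(m-1)
--     l=base(x//off,y//off)
--     if m==1 or l==1:
--         return l==1
--     if l==0:
--         return False
--     return rec(m-1,x%off,y%off)
-- ===== SOURCE B (Python) =====
-- def base(x, y):
--     if (x in [1, 2, 3] and y == 0) or (x == 2 and y == 1):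
--         return 1
--     if (x in [1, 3] and y == 1) or (x == 2 and y == 2):
--         return 2
--     return 0
--
--
-- def _digits(t, n):
--     # low n base-5 digits of t (least significant first) and the remaining quotient
--     ds = []
--     for _ in range(n):
--         ds.append(t % 5)
--         t //= 5
--     return ds, t
--
--
-- def rec(m, x, y):
--     # depth <= 0: empty pattern, never shaded
--     if m < 1:
--         return False
--     dx, tx = _digits(x, m - 1)
--     dy, ty = _digits(y, m - 1)
--     l = base(tx, ty)
--     for a, b in zip(reversed(dx), reversed(dy)):
--         if l != 2:
--             break
--         l = base(a, b)
--     return l == 1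
-- ===== Notes on version B (the rewrite author's own statement) =====
-- stated objective: alternative
-- what changed: Replaces the recursion that repeatedly recomputes 5**(m-1) and divides by it with a single base-5 digit extraction pass followed by an iterative most-significant-first scan of the digit pairs with early exit; no recursion stack and no large powers.
import Mathlib
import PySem

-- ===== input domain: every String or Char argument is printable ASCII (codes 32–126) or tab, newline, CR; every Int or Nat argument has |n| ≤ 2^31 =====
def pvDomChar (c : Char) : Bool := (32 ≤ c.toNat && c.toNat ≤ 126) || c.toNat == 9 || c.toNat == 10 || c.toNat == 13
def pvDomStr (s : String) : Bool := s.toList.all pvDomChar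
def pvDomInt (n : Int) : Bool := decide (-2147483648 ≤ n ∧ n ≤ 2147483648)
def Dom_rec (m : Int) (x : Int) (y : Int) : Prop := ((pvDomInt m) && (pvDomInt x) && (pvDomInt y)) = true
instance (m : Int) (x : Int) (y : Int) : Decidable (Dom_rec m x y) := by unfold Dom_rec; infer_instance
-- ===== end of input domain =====

-- B replaces A's recursion (which recomputes 5**(m-1) at every level) by one base-5
-- digit-extraction pass plus an iterative most-significant-first scan: same values, different decomposition.

-- ===== PORT A =====
def base (x : Int) (y : Int) : Int :=
  if ((x ∈ ([1, 2, 3] : List Int)) ∧ y = 0) ∨ (x = 2 ∧ y = 1) then 1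
  else if ((x ∈ ([1, 3] : List Int)) ∧ y = 1) ∨ (x = 2 ∧ y = 2) then 2
  else 0

-- For m ≤ 0 Python's `off = 5**(m-1)` is a FLOAT (no PySem construct); hand-ported: on the
-- admitted inputs (Pre_rec: m ≥ -461, no underflow) that float path always makes `base`
-- return 0 and A returns False, which the first branch reproduces exactly.
def rec (m : Int) (x : Int) (y : Int) : Bool :=
  if m ≤ 0 then false
  else
    let off : Int := 5 ^ (m - 1).toNat
    let l := base (PySem.Int.floordiv x off) (PySem.Int.floordiv y off)
    if m = 1 ∨ l = 1 then l == 1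
    else if l = 0 then false
    else rec (m - 1) (PySem.Int.mod x off) (PySem.Int.mod y off)
termination_by m.toNat
decreasing_by omega

-- ===== PORT B =====
-- low n base-5 digits of t (least significant first) and the remaining quotient
def digitsB : Nat → Int → List Int × Int
  | 0, t => ([], t)
  | n + 1, t =>
      let p := digitsB n (PySem.Int.floordiv t 5)
      (PySem.Int.mod t 5 :: p.1, p.2)

-- the for-loop over zipped reversed digit pairs with early break
def walkB : Int → List (Int × Int) → Int
  | l, [] => l
  | l, (a, b) :: rest => if l ≠ 2 then l else walkB (base a b) rest

def rec_alt (m : Int) (x : Int) (y : Int) : Bool :=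
  if m < 1 then false
  else
    let px := digitsB (m - 1).toNat x
    let py := digitsB (m - 1).toNat y
    let l := base px.2 py.2
    walkB l (List.zip px.1.reverse py.1.reverse) == 1

-- ===== PRECONDITION & SPEC =====
-- Pre_rec excludes exactly the inputs where Python A raises: for m ≤ -462 the float
-- 5**(m-1) underflows to 0.0 and `x // 0.0` raises ZeroDivisionError.
def Pre_rec (m : Int) (x : Int) (y : Int) : Prop := -461 ≤ m
instance (m : Int) (x : Int) (y : Int) : Decidable (Pre_rec m x y) := by unfold Pre_rec; infer_instance
def pvWitness_rec : Int × Int × Int := (3, 37, 12)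

def Spec_rec (m : Int) (x : Int) (y : Int) (out : Bool) : Prop := out = rec_alt m x y
instance (m : Int) (x : Int) (y : Int) (out : Bool) : Decidable (Spec_rec m x y out) := by unfold Spec_rec; infer_instance

-- ===== CLAIM (what is proved, stated in full; the proofs are below) =====
def Claim_equal_rec : Prop := ∀ (m : Int) (x : Int) (y : Int), Dom_rec m x y → Pre_rec m x y → Spec_rec m x y (rec m x y)


-- ===== LEMMAS AND PROOFS =====

-- floor-division / floor-mod arithmetic for the digit decomposition (positive powers of 5)
theorem fd_one (t : Int) : PySem.Int.floordiv t 1 = t := by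
  rw [PySem.Int.floordiv_eq_ediv_of_pos (by norm_num)]; exact Int.ediv_one t

theorem fd_fd (t : Int) (n : Nat) :
    PySem.Int.floordiv (PySem.Int.floordiv t 5) (5 ^ n) = PySem.Int.floordiv t (5 ^ (n + 1)) := by
  rw [PySem.Int.floordiv_eq_ediv_of_pos (by norm_num), PySem.Int.floordiv_eq_ediv_of_pos (by positivity),
      PySem.Int.floordiv_eq_ediv_of_pos (by positivity), Int.ediv_ediv_of_nonneg (by norm_num)]
  ring_nf

theorem md_md (t : Int) (n : Nat) :
    PySem.Int.mod (PySem.Int.mod t (5 ^ (n + 2))) 5 = PySem.Int.mod t 5 := by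
  rw [PySem.Int.mod_eq_emod_of_pos (by positivity), PySem.Int.mod_eq_emod_of_pos (by norm_num),
      PySem.Int.mod_eq_emod_of_pos (by norm_num)]
  exact Int.emod_emod_of_dvd t (dvd_pow_self 5 (by omega))

theorem fd_md (t : Int) (n : Nat) :
    PySem.Int.floordiv (PySem.Int.mod t (5 ^ (n + 2))) 5
      = PySem.Int.mod (PySem.Int.floordiv t 5) (5 ^ (n + 1)) := by
  rw [PySem.Int.mod_eq_emod_of_pos (by positivity), PySem.Int.mod_eq_emod_of_pos (by positivity),
      PySem.Int.floordiv_eq_ediv_of_pos (by norm_num), PySem.Int.floordiv_eq_ediv_of_pos (by norm_num)]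
  have h5 : ((5:Int)) ^ (n + 2) = 5 ^ (n + 1) * 5 := by ring
  rw [h5, Int.emod_def, Int.emod_def]
  have h1 : t - 5 ^ (n+1) * 5 * (t / (5 ^ (n+1) * 5))
      = t + (-(5 ^ (n+1) * (t / (5 ^ (n+1) * 5)))) * 5 := by ring
  rw [h1, Int.add_mul_ediv_right _ _ (by norm_num : (5:Int) ≠ 0)]
  have h2 : t / (5 ^ (n+1) * 5) = t / 5 / 5 ^ (n+1) := by
    rw [Int.ediv_ediv_of_nonneg (by norm_num), mul_comm]
  rw [h2]; ring

theorem base_cases (x y : Int) : base x y = 0 ∨ base x y = 1 ∨ base x y = 2 := by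
  unfold base; split_ifs <;> simp

theorem digits_snd (n : Nat) (t : Int) :
    (digitsB n t).2 = PySem.Int.floordiv t (5 ^ n) := by
  induction n generalizing t with
  | zero => simp [digitsB, fd_one]
  | succ n ih => simp only [digitsB]; rw [ih, fd_fd]

theorem digits_peel_top (n : Nat) (t : Int) :
    (digitsB (n + 1) t).1
      = (digitsB n t).1 ++ [PySem.Int.mod (PySem.Int.floordiv t (5 ^ n)) 5] := by
  induction n generalizing t with
  | zero => simp [digitsB, fd_one]
  | succ n ih =>
      show PySem.Int.mod t 5 :: (digitsB (n+1) (PySem.Int.floordiv t 5)).1 = _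
      rw [ih]
      simp only [digitsB, List.cons_append, fd_fd]

theorem digits_mod (n : Nat) (t : Int) :
    digitsB n (PySem.Int.mod t (5 ^ (n + 1)))
      = ((digitsB n t).1, PySem.Int.mod (PySem.Int.floordiv t (5 ^ n)) 5) := by
  induction n generalizing t with
  | zero => simp [digitsB, fd_one]
  | succ n ih =>
      simp only [digitsB]
      rw [md_md, fd_md, ih, fd_fd]

theorem alt_step (n : Nat) (x y : Int) :
    rec_alt ((n : Int) + 2) x y =
      (let off : Int := 5 ^ (n + 1)
       let l := base (PySem.Int.floordiv x off) (PySem.Int.floordiv y off)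
       if l = 1 then true
       else if l = 0 then false
       else rec_alt ((n : Int) + 1) (PySem.Int.mod x off) (PySem.Int.mod y off)) := by
  have ht2 : (((n : Int) + 2) - 1).toNat = n + 1 := by omega
  have ht1 : (((n : Int) + 1) - 1).toNat = n := by omega
  simp only [rec_alt, ht2, ht1]
  rw [if_neg (show ¬((n:Int) + 2 < 1) by omega), if_neg (show ¬((n:Int) + 1 < 1) by omega)]
  rw [digits_mod n x, digits_mod n y]
  rw [digits_peel_top n x, digits_peel_top n y, digits_snd (n+1) x, digits_snd (n+1) y]
  simp only [List.reverse_append, List.reverse_cons, List.reverse_nil, List.nil_append,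
    List.singleton_append, List.zip_cons_cons]
  rcases base_cases (PySem.Int.floordiv x (5 ^ (n+1))) (PySem.Int.floordiv y (5 ^ (n+1))) with h | h | h <;>
    rw [h] <;> simp only [walkB] <;> simp

theorem main_eq (n : Nat) (x y : Int) : rec ((n : Int) + 1) x y = rec_alt ((n : Int) + 1) x y := by
  induction n generalizing x y with
  | zero =>
      have h0 : ((0:Nat):Int) + 1 = 1 := by norm_num
      rw [h0, rec]
      rw [if_neg (show ¬((1:Int) ≤ 0) by norm_num)]
      simp only [rec_alt]
      rw [if_neg (show ¬((1:Int) < 1) by norm_num)]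
      have ht : ((1:Int) - 1).toNat = 0 := by norm_num
      simp only [ht, digitsB, List.reverse_nil, List.zip_nil_left, walkB, fd_one]
      simp
  | succ n ih =>
      have hc : ((n + 1 : Nat) : Int) + 1 = (n : Int) + 2 := by push_cast; ring
      rw [hc, alt_step, rec]
      have ht : (((n : Int) + 2) - 1).toNat = n + 1 := by omega
      rw [if_neg (by omega)]
      simp only [ht]
      rcases base_cases (PySem.Int.floordiv x (5 ^ (n+1))) (PySem.Int.floordiv y (5 ^ (n+1))) with h | h | h <;>
        simp only [h]
      · norm_num
      · norm_num
      · have hm2 : ¬((n : Int) + 2 = 1 ∨ (2:Int) = 1) := by omega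
        rw [if_neg hm2]
        have hr : (n:Int) + 2 - 1 = (n:Int) + 1 := by ring
        rw [hr]
        norm_num
        exact ih _ _


-- ===== VERDICT (by name: the statement is the Claim_ definition above) =====
theorem rec_spec : Claim_equal_rec := by
  intro m x y _ hpre
  unfold Spec_rec
  by_cases hm : m ≤ 0
  · rw [rec]; simp [hm]
    rw [rec_alt]; simp; omega
  · have h1 : 1 ≤ m := by omega
    have : m = ((m - 1).toNat : Int) + 1 := by omega
    rw [this]
    exact main_eq (m - 1).toNat x y
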